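-- pv_equiv track=rewrite | github.com/ykghani/advent-of-code-21 | d17.py | update_pos
-- ===== SOURCE A (Python) =====
-- def update_pos(x, y, vx, vy, steps = 1):
--     for _ in range(steps):
--         x += vx
--         y += vy
--         if vx > 0:
--             vx -= 1
--         elif vx < 0:
--             vx +=1
--         vy -= 1
--     return x, y, vx, vy
-- ===== SOURCE B (Python) =====
-- def update_pos(x, y, vx, vy, steps=1):
--     # Closed form: arithmetic-series displacements instead of per-step simulation.
--     n = max(steps, 0)
--     y2 = y + n * vy - n * (n - 1) // 2
--     vy2 = vy - n
--     m = abs(vx)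
--     s = 1 if vx > 0 else (-1 if vx < 0 else 0)
--     if n >= m:
--         x2 = x + s * (m * (m + 1) // 2)
--         vx2 = 0
--     else:
--         x2 = x + s * (n * m - n * (n - 1) // 2)
--         vx2 = s * (m - n)
--     return x2, y2, vx2, vy2
-- ===== Notes on version B (the rewrite author's own statement) =====
-- stated objective: faster
-- what changed: Replaces the per-step simulation loop with closed-form arithmetic-series (triangular-number) formulas for the x/y displacements and final velocities.
import Mathlib
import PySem

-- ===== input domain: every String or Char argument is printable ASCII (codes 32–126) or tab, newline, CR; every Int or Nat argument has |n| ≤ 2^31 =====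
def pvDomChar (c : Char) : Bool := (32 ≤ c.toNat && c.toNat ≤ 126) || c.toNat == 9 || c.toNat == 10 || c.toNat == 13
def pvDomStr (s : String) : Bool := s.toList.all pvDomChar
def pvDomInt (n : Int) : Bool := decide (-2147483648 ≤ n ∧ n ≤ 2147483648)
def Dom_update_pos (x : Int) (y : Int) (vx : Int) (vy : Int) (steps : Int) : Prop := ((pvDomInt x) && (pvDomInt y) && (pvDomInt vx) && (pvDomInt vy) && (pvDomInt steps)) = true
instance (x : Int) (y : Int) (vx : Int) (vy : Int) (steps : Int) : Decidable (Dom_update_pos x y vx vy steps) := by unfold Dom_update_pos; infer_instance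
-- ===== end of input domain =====

-- B replaces the step-by-step velocity/position loop with closed-form triangular-sum formulas (O(1) instead of O(steps)).
-- ===== PORT A =====
def updLoop : Nat → Int → Int → Int → Int → Int × Int × Int × Int
  | 0, x, y, vx, vy => (x, y, vx, vy)
  | Nat.succ k, x, y, vx, vy =>
      updLoop k (x + vx) (y + vy)
        (if vx > 0 then vx - 1 else if vx < 0 then vx + 1 else vx) (vy - 1)

def update_pos (x : Int) (y : Int) (vx : Int) (vy : Int) (steps : Int) : List Int :=
  let r := updLoop steps.toNat x y vx vy
  [r.1, r.2.1, r.2.2.1, r.2.2.2]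

-- ===== PORT B =====
def update_pos_alt (x : Int) (y : Int) (vx : Int) (vy : Int) (steps : Int) : List Int :=
  let n := max steps 0
  let y2 := y + n * vy - PySem.Int.floordiv (n * (n - 1)) 2
  let vy2 := vy - n
  let m := |vx|
  let s : Int := if vx > 0 then 1 else if vx < 0 then -1 else 0
  if n ≥ m then
    [x + s * PySem.Int.floordiv (m * (m + 1)) 2, y2, 0, vy2]
  else
    [x + s * (n * m - PySem.Int.floordiv (n * (n - 1)) 2), y2, s * (m - n), vy2]

-- ===== PRECONDITION & SPEC =====
def Spec_update_pos (x : Int) (y : Int) (vx : Int) (vy : Int) (steps : Int) (out : List Int) : Prop := out = update_pos_alt x y vx vy steps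
instance (x : Int) (y : Int) (vx : Int) (vy : Int) (steps : Int) (out : List Int) : Decidable (Spec_update_pos x y vx vy steps out) := by unfold Spec_update_pos; infer_instance

-- ===== CLAIM (what is proved, stated in full; the proofs are below) =====
def Claim_equal_update_pos : Prop := ∀ (x : Int) (y : Int) (vx : Int) (vy : Int) (steps : Int), Dom_update_pos x y vx vy steps → Spec_update_pos x y vx vy steps (update_pos x y vx vy steps)

-- ===== LEMMAS AND PROOFS =====

-- exact halving: for an even numerator Python's // 2 doubles back
theorem pv_fd_double (a : Int) (h : 2 ∣ a) : 2 * PySem.Int.floordiv a 2 = a := by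
  rw [PySem.Int.floordiv_eq_ediv_of_pos (by norm_num : (0:Int) < 2)]
  exact Int.mul_ediv_cancel' h

theorem pv_even_mul_sub_one (k : Int) : 2 ∣ k * (k - 1) := by
  have h := Int.even_mul_succ_self (k - 1)
  obtain ⟨c, hc⟩ := h
  exact ⟨c, by linarith [hc]⟩

theorem pv_even_mul_add_one (k : Int) : 2 ∣ k * (k + 1) := by
  obtain ⟨c, hc⟩ := Int.even_mul_succ_self k
  exact ⟨c, by linarith [hc]⟩

-- the closed form the loop computes, as one invariant
theorem pv_loop_eq : ∀ (n : Nat) (x y vx vy : Int),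
    updLoop n x y vx vy =
      (x + (if (n : Int) ≥ |vx| then
              (if vx > 0 then (1:Int) else if vx < 0 then -1 else 0) * PySem.Int.floordiv (|vx| * (|vx| + 1)) 2
            else
              (if vx > 0 then (1:Int) else if vx < 0 then -1 else 0) * ((n : Int) * |vx| - PySem.Int.floordiv ((n : Int) * ((n : Int) - 1)) 2)),
       y + (n : Int) * vy - PySem.Int.floordiv ((n : Int) * ((n : Int) - 1)) 2,
       (if (n : Int) ≥ |vx| then 0
        else (if vx > 0 then (1:Int) else if vx < 0 then -1 else 0) * (|vx| - (n : Int))),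
       vy - (n : Int)) := by
  intro n
  induction n with
  | zero =>
    intro x y vx vy
    have h0 : PySem.Int.floordiv 0 2 = 0 := by decide
    simp only [updLoop, Nat.cast_zero, Prod.mk.injEq]
    rcases lt_trichotomy vx 0 with hv | hv | hv
    · rw [abs_of_neg hv]
      have hcond : ¬ ((0:Int) ≥ -vx) := by omega
      simp only [if_neg hcond, if_neg (by omega : ¬ vx > 0), if_pos hv]
      refine ⟨by rw [zero_mul, zero_mul, h0]; ring, by rw [zero_mul, zero_mul, h0]; ring, by ring, by ring⟩
    · subst hv
      simp only [abs_zero, ge_iff_le, le_refl, if_pos, lt_irrefl]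
      norm_num
    · rw [abs_of_pos hv]
      have hcond : ¬ ((0:Int) ≥ vx) := by omega
      simp only [if_neg hcond, if_pos hv]
      refine ⟨by rw [zero_mul, zero_mul, h0]; ring, by rw [zero_mul, zero_mul, h0]; ring, by ring, by ring⟩
  | succ n ih =>
    intro x y vx vy
    have hT1 := pv_fd_double (((n:Int)+1) * (((n:Int)+1) - 1)) (pv_even_mul_sub_one _)
    have hT0 := pv_fd_double ((n:Int) * ((n:Int) - 1)) (pv_even_mul_sub_one _)
    simp only [updLoop]
    rw [ih]
    simp only [Prod.mk.injEq, Nat.cast_succ]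
    refine ⟨?_, by linarith, ?_, by ring⟩
    · -- x component
      rcases lt_trichotomy vx 0 with hv | hv | hv
      · -- vx < 0 : step is vx + 1
        rw [abs_of_neg hv]
        by_cases hv1 : vx = -1
        · subst hv1
          have hfd : PySem.Int.floordiv (2:Int) 2 = 1 := by decide
          norm_num [hfd]
        · have hv2 : vx ≤ -2 := by omega
          have hstep : (if vx > 0 then vx - 1 else if vx < 0 then vx + 1 else vx) = vx + 1 := by
            rw [if_neg (by omega), if_pos hv]
          rw [hstep, abs_of_neg (by omega : vx + 1 < 0)]
          rw [if_neg (by omega : ¬ (vx + 1) > 0), if_pos (by omega : vx + 1 < 0)]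
          rw [if_neg (by omega : ¬ vx > 0), if_pos hv]
          by_cases hc : ((n:Int) + 1 ≥ -vx)
          · rw [if_pos hc, if_pos (by omega : (n:Int) ≥ -(vx+1))]
            have ha := pv_fd_double (-vx * (-vx + 1)) (pv_even_mul_add_one _)
            have hb := pv_fd_double (-(vx+1) * (-(vx+1) + 1)) (pv_even_mul_add_one _)
            nlinarith [ha, hb]
          · rw [if_neg hc, if_neg (by omega : ¬ (n:Int) ≥ -(vx+1))]
            nlinarith [hT1, hT0]
      · -- vx = 0
        subst hv
        have hstep : (if (0:Int) > 0 then (0:Int) - 1 else if (0:Int) < 0 then 0 + 1 else 0) = 0 := by norm_num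
        rw [hstep]
        simp only [abs_zero, lt_irrefl]
        split_ifs <;> first | exact (‹False›).elim | ring
      · -- vx > 0 : step is vx - 1
        rw [abs_of_pos hv]
        by_cases hv1 : vx = 1
        · subst hv1
          have hfd : PySem.Int.floordiv (2:Int) 2 = 1 := by decide
          norm_num [hfd]
        · have hv2 : (2:Int) ≤ vx := by omega
          have hstep : (if vx > 0 then vx - 1 else if vx < 0 then vx + 1 else vx) = vx - 1 := by
            rw [if_pos hv]
          rw [hstep, abs_of_pos (by omega : (0:Int) < vx - 1)]
          rw [if_pos (by omega : vx - 1 > 0), if_pos hv]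
          by_cases hc : ((n:Int) + 1 ≥ vx)
          · rw [if_pos hc, if_pos (by omega : (n:Int) ≥ vx - 1)]
            have ha := pv_fd_double (vx * (vx + 1)) (pv_even_mul_add_one _)
            have hb := pv_fd_double ((vx - 1) * ((vx - 1) + 1)) (pv_even_mul_add_one _)
            nlinarith [ha, hb]
          · rw [if_neg hc, if_neg (by omega : ¬ (n:Int) ≥ vx - 1)]
            nlinarith [hT1, hT0]
    · -- vx' component
      rcases lt_trichotomy vx 0 with hv | hv | hv
      · rw [abs_of_neg hv]
        by_cases hv1 : vx = -1
        · subst hv1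
          norm_num
        · have hstep : (if vx > 0 then vx - 1 else if vx < 0 then vx + 1 else vx) = vx + 1 := by
            rw [if_neg (by omega), if_pos hv]
          rw [hstep, abs_of_neg (by omega : vx + 1 < 0)]
          rw [if_neg (by omega : ¬ (vx + 1) > 0), if_pos (by omega : vx + 1 < 0)]
          rw [if_neg (by omega : ¬ vx > 0), if_pos hv]
          by_cases hc : ((n:Int) + 1 ≥ -vx)
          · rw [if_pos hc, if_pos (by omega : (n:Int) ≥ -(vx+1))]
          · rw [if_neg hc, if_neg (by omega : ¬ (n:Int) ≥ -(vx+1))]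
            ring
      · subst hv
        have hstep : (if (0:Int) > 0 then (0:Int) - 1 else if (0:Int) < 0 then 0 + 1 else 0) = 0 := by norm_num
        rw [hstep]
        simp only [abs_zero, lt_irrefl]
        split_ifs <;> first | exact (‹False›).elim | rfl | simp
      · rw [abs_of_pos hv]
        by_cases hv1 : vx = 1
        · subst hv1
          norm_num
        · have hstep : (if vx > 0 then vx - 1 else if vx < 0 then vx + 1 else vx) = vx - 1 := by
            rw [if_pos hv]
          rw [hstep, abs_of_pos (by omega : (0:Int) < vx - 1)]
          rw [if_pos (by omega : vx - 1 > 0), if_pos hv]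
          by_cases hc : ((n:Int) + 1 ≥ vx)
          · rw [if_pos hc, if_pos (by omega : (n:Int) ≥ vx - 1)]
          · rw [if_neg hc, if_neg (by omega : ¬ (n:Int) ≥ vx - 1)]
            ring

-- ===== VERDICT (by name: the statement is the Claim_ definition above) =====
theorem update_pos_spec : Claim_equal_update_pos := by
  intro x y vx vy steps _
  unfold Spec_update_pos update_pos update_pos_alt
  have hmax : ((steps.toNat : Nat) : Int) = max steps 0 := Int.ofNat_toNat steps
  rw [pv_loop_eq, hmax]
  by_cases hc : (max steps 0 ≥ |vx|)
  · simp only [if_pos hc]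
  · simp only [if_neg hc]
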